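-- pv_equiv track=rewrite | github.com/BenLaurense/sushi-go | Cards/scorers.py | score_maki
-- ===== SOURCE A (Python) =====
-- def score_maki(stats):
--     num_players = len(stats)
--
--     sorted_scores = list(set(stats.copy()))
--     if len(sorted_scores) < 2:
--         return [6]*len(stats)
--     elif num_players > 5 and len(sorted_scores) < 3:
--         sorted_scores.append(-1)
--
--     sorted_scores.sort()
--     if num_players == 2:
--         largest_scores = sorted_scores[-2:]
--     else:
--         largest_scores = sorted_scores[-3:]
--
--     maki_score = [0]*num_players
--     for i in range(num_players):
--         if stats[i] == largest_scores[-1]: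
--             maki_score[i] = 6
--         elif num_players > 5 and stats[i] == largest_scores[-2]:
--             maki_score[i] = 4
--         elif stats[i] == largest_scores[-2]:
--             maki_score[i] = 3
--         elif num_players > 5 and stats[i] == largest_scores[-3]:
--             maki_score[i] = 2
--
--     return maki_score
-- ===== SOURCE B (Python) =====
-- def score_maki(stats):
--     distinct = set(stats)
--     n = len(stats)
--
--     def points(s):
--         rank = sum(1 for d in distinct if d > s)
--         if rank == 0:
--             return 6
--         if rank == 1:
--             return 4 if n > 5 else 3
--         if rank == 2:
--             return 2 if n > 5 else 0
--         return 0
--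
--     return [points(s) for s in stats]
-- ===== Notes on version B (the rewrite author's own statement) =====
-- stated objective: simpler
-- what changed: B drops A's copy/set/sort, top-3 slice, -1 sentinel append and negative-index elif chain, and instead computes each player's rank as the count of distinct scores strictly above theirs and maps rank directly to points.
-- intended difference: On lists with more than 5 players and exactly two distinct scores whose lower score is below -1, A awards the second-place players 2 points (its -1 sentinel sorts above the real second score), while B awards the intended 4 points for second place among more than 5 players. — e.g. on score_maki([5, 5, 5, 5, 5, -2]): A returns [6, 6, 6, 6, 6, 2], B returns [6, 6, 6, 6, 6, 4]
import Mathlib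
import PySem

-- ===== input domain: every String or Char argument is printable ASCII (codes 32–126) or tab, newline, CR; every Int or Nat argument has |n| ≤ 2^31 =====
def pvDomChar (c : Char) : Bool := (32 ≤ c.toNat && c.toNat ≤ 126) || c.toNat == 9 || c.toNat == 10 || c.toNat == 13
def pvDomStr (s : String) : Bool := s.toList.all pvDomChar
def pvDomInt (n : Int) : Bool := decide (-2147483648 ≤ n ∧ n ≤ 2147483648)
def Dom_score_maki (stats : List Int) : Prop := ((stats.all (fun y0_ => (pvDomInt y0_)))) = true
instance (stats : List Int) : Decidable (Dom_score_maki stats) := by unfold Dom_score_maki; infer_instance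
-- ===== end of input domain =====

-- B replaces A's sort / top-3-slice / -1-sentinel machinery by counting, for each player, the distinct
-- scores strictly above theirs (the rank) and mapping rank to points directly (objective: simpler).

-- ===== PORT A =====
def score_maki (stats : List Int) : List Int :=
  let num_players : Int := stats.length
  let sorted_scores : List Int := PySem.Set.ofList stats
  if sorted_scores.length < 2 then
    List.replicate stats.length 6
  else
    let sorted_scores : List Int :=
      if 5 < num_players ∧ sorted_scores.length < 3 then sorted_scores ++ [-1] else sorted_scores
    let sorted_scores : List Int := PySem.List.sorted sorted_scores (fun x => x)
    let largest_scores : List Int :=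
      if num_players = 2 then PySem.List.slice sorted_scores (some (-2)) none
      else PySem.List.slice sorted_scores (some (-3)) none
    stats.map (fun s =>
      if s = PySem.List.pyGetD largest_scores (-1) 0 then (6 : Int)
      else if 5 < num_players ∧ s = PySem.List.pyGetD largest_scores (-2) 0 then 4
      else if s = PySem.List.pyGetD largest_scores (-2) 0 then 3
      else if 5 < num_players ∧ s = PySem.List.pyGetD largest_scores (-3) 0 then 2
      else 0)

-- ===== PORT B =====
def score_maki_alt (stats : List Int) : List Int :=
  let distinct : List Int := PySem.Set.ofList stats
  let n : Int := stats.length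
  stats.map (fun s =>
    let rank : Int := (distinct.map (fun d => if s < d then (1 : Int) else 0)).sum
    if rank = 0 then (6 : Int)
    else if rank = 1 then (if 5 < n then 4 else 3)
    else if rank = 2 then (if 5 < n then 2 else 0)
    else 0)

-- ===== PRECONDITION & SPEC =====
-- On lists with more than 5 players and exactly two distinct scores whose lower score is below -1,
-- A awards the second-place players 2 points (its -1 sentinel sorts above the real second score),
-- while B awards the intended 4 points for second place among more than 5 players.
def D_score_maki (stats : List Int) : Prop :=
  5 < stats.length ∧ (PySem.Set.ofList stats).length = 2 ∧ (stats.min?).getD 0 < -1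
instance (stats : List Int) : Decidable (D_score_maki stats) := by unfold D_score_maki; infer_instance

def Spec_score_maki (stats : List Int) (out : List Int) : Prop :=
  ¬ D_score_maki stats → out = score_maki_alt stats
instance (stats : List Int) (out : List Int) : Decidable (Spec_score_maki stats out) := by unfold Spec_score_maki; infer_instance

def pvDiffWitness_score_maki : List Int := [5, 5, 5, 5, 5, -2]
def pvDiffWitnessOut_score_maki : (List Int) × (List Int) := ([6, 6, 6, 6, 6, 2], [6, 6, 6, 6, 6, 4])

-- ===== CLAIM (what is proved, stated in full; the proofs are below) =====
def Claim_unchanged_score_maki : Prop := ∀ (stats : List Int), Dom_score_maki stats → Spec_score_maki stats (score_maki stats)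
def Claim_changed_score_maki : Prop := Dom_score_maki (pvDiffWitness_score_maki) ∧ D_score_maki (pvDiffWitness_score_maki) ∧ score_maki (pvDiffWitness_score_maki) = pvDiffWitnessOut_score_maki.1 ∧ score_maki_alt (pvDiffWitness_score_maki) = pvDiffWitnessOut_score_maki.2 ∧ pvDiffWitnessOut_score_maki.1 ≠ pvDiffWitnessOut_score_maki.2
def Claim_exact_score_maki : Prop := ∀ (stats : List Int), Dom_score_maki stats → D_score_maki stats → score_maki stats ≠ score_maki_alt stats

-- ===== LEMMAS AND PROOFS =====

theorem countP_lt_of_pairwise (L : List Int) (h : L.Pairwise (· < ·)) :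
    ∀ (i : Nat) (hi : i < L.length), L.countP (fun d => decide (L[i] < d)) = L.length - 1 - i := by
  induction L with
  | nil => intro i hi; simp at hi
  | cons x xs ih =>
    rcases List.pairwise_cons.mp h with ⟨hx, hxs⟩
    intro i hi
    cases i with
    | zero =>
      simp only [List.getElem_cons_zero]
      rw [List.countP_cons_of_neg (pa := by simp)]
      exact (List.countP_eq_length.mpr (fun a ha => by simpa using hx a ha)).trans (by simp)
    | succ i =>
      have hi' : i < xs.length := by simpa using hi
      simp only [List.getElem_cons_succ]
      rw [List.countP_cons_of_neg (pa := by simp; have := hx _ (List.getElem_mem hi'); omega)]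
      exact (ih hxs i hi').trans (by simp only [List.length_cons]; omega)

def pvPts (np : Int) (r : Nat) : Int :=
  if r = 0 then 6 else if r = 1 then (if 5 < np then 4 else 3)
  else if r = 2 then (if 5 < np then 2 else 0) else 0

theorem alt_eq (stats : List Int) :
    score_maki_alt stats = stats.map (fun s =>
      pvPts (stats.length : Int) ((PySem.Set.ofList stats).countP (fun d => decide (s < d)))) := by
  unfold score_maki_alt
  refine List.map_congr_left (fun s hs => ?_)
  have hconv : (fun (d : Int) => if s < d then (1 : Int) else 0)
      = (fun d => if (decide (s < d)) = true then (1 : Int) else 0) := by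
    funext d; by_cases h : s < d <;> simp [h]
  rw [hconv, PySem.List.sum_map_ite_one_zero]
  simp only [pvPts]
  split_ifs <;> omega

theorem nodup_of_pairwise_lt (L : List Int) (h : L.Pairwise (· < ·)) : L.Nodup :=
  h.imp (fun hab => ne_of_lt hab)

-- per-element branch evaluation in the no-sentinel case
theorem elem_eq_nosent (L : List Int) (np : Int)
    (hL : L.Pairwise (· < ·)) (hk : 2 ≤ L.length) (hnp : ¬(5 < np ∧ L.length < 3))
    (s : Int) (hs : s ∈ L) :
    (if s = PySem.List.pyGetD (L.drop (L.length - 3)) (-1) 0 then (6 : Int)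
     else if 5 < np ∧ s = PySem.List.pyGetD (L.drop (L.length - 3)) (-2) 0 then 4
     else if s = PySem.List.pyGetD (L.drop (L.length - 3)) (-2) 0 then 3
     else if 5 < np ∧ s = PySem.List.pyGetD (L.drop (L.length - 3)) (-3) 0 then 2
     else 0)
    = pvPts np (L.countP (fun d => decide (s < d))) := by
  have hnd : L.Nodup := nodup_of_pairwise_lt L hL
  obtain ⟨i, hi, rfl⟩ := List.mem_iff_getElem.mp hs
  rw [countP_lt_of_pairwise L hL i hi]
  have heq : ∀ (j : Nat) (hj : j < L.length), (L[i] = L[j]) ↔ i = j :=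
    fun j hj => hnd.getElem_inj_iff
  rcases Nat.lt_or_ge L.length 3 with hk3 | hk3
  · -- L.length = 2, and no sentinel forces np ≤ 5
    have hk2 : L.length = 2 := by omega
    have hnp5 : ¬ 5 < np := fun h5 => hnp ⟨h5, by omega⟩
    have hdrop : L.drop (L.length - 3) = L := by rw [hk2]; rfl
    rw [hdrop]
    have hg1 : PySem.List.pyGetD L (-1) 0 = L[L.length - 1] :=
      PySem.List.pyGetD_neg_ofNat L 1 0 (by omega) (by omega)
    have hg2 : PySem.List.pyGetD L (-2) 0 = L[L.length - 2] :=
      PySem.List.pyGetD_neg_ofNat L 2 0 (by omega) (by omega)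
    rw [hg1, hg2]
    by_cases h1 : i = L.length - 1
    · rw [if_pos ((heq _ (by omega)).mpr h1)]
      rw [show L.length - 1 - i = 0 by omega]
      simp [pvPts]
    · rw [if_neg (fun hc => h1 ((heq _ (by omega)).mp hc))]
      have h0 : i = L.length - 2 := by omega
      rw [if_neg (fun hc => hnp5 hc.1), if_pos ((heq _ (by omega)).mpr h0)]
      rw [show L.length - 1 - i = 1 by omega]
      simp [pvPts, hnp5]
  · -- L.length ≥ 3
    have hld : (L.drop (L.length - 3)).length = 3 := by simp; omega
    have e1 : PySem.List.pyGetD (L.drop (L.length - 3)) (-1) 0 = L[L.length - 1] := by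
      rw [PySem.List.pyGetD_neg_ofNat _ 1 0 (by omega) (by omega), List.getElem_drop]
      exact getElem_congr_idx (by omega)
    have e2 : PySem.List.pyGetD (L.drop (L.length - 3)) (-2) 0 = L[L.length - 2] := by
      rw [PySem.List.pyGetD_neg_ofNat _ 2 0 (by omega) (by omega), List.getElem_drop]
      exact getElem_congr_idx (by omega)
    have e3 : PySem.List.pyGetD (L.drop (L.length - 3)) (-3) 0 = L[L.length - 3] := by
      rw [PySem.List.pyGetD_neg_ofNat _ 3 0 (by omega) (by omega), List.getElem_drop]
      exact getElem_congr_idx (by omega)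
    rw [e1, e2, e3]
    by_cases h1 : i = L.length - 1
    · rw [if_pos ((heq _ (by omega)).mpr h1)]
      rw [show L.length - 1 - i = 0 by omega]
      simp [pvPts]
    · rw [if_neg (fun hc => h1 ((heq _ (by omega)).mp hc))]
      by_cases h2 : i = L.length - 2
      · have hr : L.length - 1 - i = 1 := by omega
        by_cases h5 : 5 < np
        · rw [if_pos ⟨h5, (heq _ (by omega)).mpr h2⟩, hr]
          simp [pvPts, h5]
        · rw [if_neg (fun hc => h5 hc.1), if_pos ((heq _ (by omega)).mpr h2), hr]
          simp [pvPts, h5]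
      · rw [if_neg (fun hc => h2 ((heq _ (by omega)).mp hc.2)),
            if_neg (fun hc => h2 ((heq _ (by omega)).mp hc))]
        by_cases h3 : i = L.length - 3
        · have hr : L.length - 1 - i = 2 := by omega
          by_cases h5 : 5 < np
          · rw [if_pos ⟨h5, (heq _ (by omega)).mpr h3⟩, hr]
            simp [pvPts, h5]
          · rw [if_neg (fun hc => h5 hc.1), hr]
            simp [pvPts, h5]
        · rw [if_neg (fun hc => h3 ((heq _ (by omega)).mp hc.2))]
          have hr : ¬(L.length - 1 - i = 0) ∧ ¬(L.length - 1 - i = 1) ∧ ¬(L.length - 1 - i = 2) := by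
            refine ⟨?_, ?_, ?_⟩ <;> omega
          simp [pvPts, hr.1, hr.2.1, hr.2.2]


theorem unchanged_main (stats : List Int) (hnD : ¬ D_score_maki stats) :
    score_maki stats = score_maki_alt stats := by
  rw [alt_eq]
  unfold score_maki
  simp only []
  by_cases h1 : (PySem.Set.ofList stats).length < 2
  · rw [if_pos h1]
    have h6 : ∀ s ∈ stats,
        pvPts (stats.length : Int) ((PySem.Set.ofList stats).countP (fun d => decide (s < d))) = 6 := by
      intro s hs
      have hsd : s ∈ PySem.Set.ofList stats := (PySem.Set.mem_ofList stats s).mpr hs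
      have hz : (PySem.Set.ofList stats).countP (fun d => decide (s < d)) = 0 := by
        apply List.countP_eq_zero.mpr
        intro d hd
        rcases hds : PySem.Set.ofList stats with _ | ⟨a, _ | ⟨b, t⟩⟩
        · rw [hds] at hsd; simp at hsd
        · rw [hds] at hsd hd
          simp at hsd hd
          simp [hsd, hd]
        · rw [hds] at h1; simp at h1
      rw [hz]; simp [pvPts]
    rw [List.map_congr_left h6]
    exact (List.map_const).symm
  · rw [if_neg h1]
    by_cases hsent : 5 < (stats.length : Int) ∧ (PySem.Set.ofList stats).length < 3
    · rw [if_pos hsent]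
      have hds2 : (PySem.Set.ofList stats).length = 2 := by omega
      obtain ⟨u, v, hds⟩ := List.length_eq_two.mp hds2
      have hnd : (PySem.Set.ofList stats).Nodup := PySem.Set.nodup_ofList stats
      have huv : u ≠ v := by rw [hds] at hnd; simp at hnd; exact hnd
      set lo := min u v with hlo'
      set hi := max u v with hhi'
      have hlh : lo < hi := min_lt_max.mpr huv
      have hperm2 : ([u, v] : List Int).Perm [lo, hi] := by
        rcases le_total u v with h | h
        · simp [hlo', hhi', min_eq_left h, max_eq_right h]
        · simp [hlo', hhi', min_eq_right h, max_eq_left h]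
          exact List.Perm.swap v u []
      have hlostats : lo ∈ stats := by
        have : lo ∈ ([u, v] : List Int) := by
          rcases min_choice u v with h | h <;> simp [hlo', h]
        rw [← hds] at this
        exact (PySem.Set.mem_ofList stats lo).mp this
      have hlen6 : 5 < stats.length := by exact_mod_cast hsent.1
      have hlomin : -1 ≤ lo := by
        have hn : ¬ ((stats.min?).getD 0 < -1) := fun hc => hnD ⟨hlen6, hds2, hc⟩
        cases hm : stats.min? with
        | none => rw [List.min?_eq_none_iff] at hm; simp [hm] at hlen6
        | some m =>
          have := List.min?_eq_some_iff.mp hm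
          have hml : m ≤ lo := this.2 lo hlostats
          rw [hm] at hn; simp at hn; omega
      have hL : PySem.List.sorted (PySem.Set.ofList stats ++ [-1]) (fun x => x) = [-1, lo, hi] := by
        apply PySem.List.sorted_id_eq_of_perm_of_pairwise
        · rw [hds]
          exact List.Perm.trans (List.perm_append_comm (l₁ := [-1]) (l₂ := [lo, hi]))
            (hperm2.symm.append_right [-1])
        · simp [List.pairwise_cons]
          omega
      rw [hL]
      have hnp2 : ¬ ((stats.length : Int) = 2) := by omega
      rw [if_neg hnp2]
      rw [PySem.List.slice_from_neg_ofNat _ 3 (by omega)]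
      have hdrop : ([-1, lo, hi] : List Int).drop (([-1, lo, hi] : List Int).length - 3) = [-1, lo, hi] := by simp
      rw [hdrop]
      have g1 : PySem.List.pyGetD ([-1, lo, hi] : List Int) (-1) 0 = hi := by
        rw [PySem.List.pyGetD_neg_ofNat _ 1 0 (by omega) (by simp)]; simp
      have g2 : PySem.List.pyGetD ([-1, lo, hi] : List Int) (-2) 0 = lo := by
        rw [PySem.List.pyGetD_neg_ofNat _ 2 0 (by omega) (by simp)]; simp
      have g3 : PySem.List.pyGetD ([-1, lo, hi] : List Int) (-3) 0 = -1 := by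
        rw [PySem.List.pyGetD_neg_ofNat _ 3 0 (by omega) (by simp)]; simp
      refine List.map_congr_left (fun s hs => ?_)
      rw [g1, g2, g3, hds]
      rw [hperm2.countP_eq]
      have hsuv : s ∈ ([lo, hi] : List Int) := by
        have : s ∈ PySem.Set.ofList stats := (PySem.Set.mem_ofList stats s).mpr hs
        rw [hds] at this
        exact hperm2.mem_iff.mp this
      simp only [List.mem_cons, List.not_mem_nil, or_false] at hsuv
      rcases hsuv with rfl | rfl
      · -- s = lo
        rw [if_neg (by omega), if_pos ⟨hsent.1, rfl⟩]
        have hc : List.countP (fun d => decide (lo < d)) [lo, hi] = 1 := by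
          simp [hlh]
        rw [hc]
        simp [pvPts, hsent.1]
      · -- s = hi
        rw [if_pos rfl]
        have hc : List.countP (fun d => decide (hi < d)) [lo, hi] = 0 := by
          simp [List.countP_cons]
          omega
        rw [hc]
        simp [pvPts]
    · rw [if_neg hsent]
      have hLp := PySem.List.sorted_ofList_pairwise_lt (κ := Int) stats
      have hperm := PySem.List.sorted_perm (PySem.Set.ofList stats) (fun x => x) false
      have hlen : (PySem.List.sorted (PySem.Set.ofList stats) (fun x => x)).length
          = (PySem.Set.ofList stats).length := PySem.List.length_sorted _ _ _
      set L := PySem.List.sorted (PySem.Set.ofList stats) (fun x => x) with hLdef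
      have hk : 2 ≤ L.length := by omega
      have hnp : ¬ (5 < (stats.length : Int) ∧ L.length < 3) := by
        rw [hlen]; exact hsent
      by_cases hnp2 : (stats.length : Int) = 2
      · rw [if_pos hnp2]
        have hst2 : stats.length = 2 := by exact_mod_cast hnp2
        have hk2 : L.length = 2 := by
          have := PySem.Set.length_ofList_le stats
          omega
        rw [PySem.List.slice_from_neg_ofNat _ 2 (by omega)]
        rw [show L.length - 2 = L.length - 3 by omega]
        refine List.map_congr_left (fun s hs => ?_)
        have hsL : s ∈ L := hperm.mem_iff.mpr ((PySem.Set.mem_ofList stats s).mpr hs)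
        rw [← hperm.countP_eq]
        exact elem_eq_nosent L _ hLp hk hnp s hsL
      · rw [if_neg hnp2]
        rw [PySem.List.slice_from_neg_ofNat _ 3 (by omega)]
        refine List.map_congr_left (fun s hs => ?_)
        have hsL : s ∈ L := hperm.mem_iff.mpr ((PySem.Set.mem_ofList stats s).mpr hs)
        rw [← hperm.countP_eq]
        exact elem_eq_nosent L _ hLp hk hnp s hsL

theorem tight_main (stats : List Int) (hD : D_score_maki stats) :
    score_maki stats ≠ score_maki_alt stats := by
  obtain ⟨hlen6, hds2, hmin⟩ := hD
  rw [alt_eq]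
  unfold score_maki
  simp only []
  rw [if_neg (by omega)]
  rw [if_pos (⟨by exact_mod_cast hlen6, by omega⟩ :
    5 < (stats.length : Int) ∧ (PySem.Set.ofList stats).length < 3)]
  obtain ⟨u, v, hds⟩ := List.length_eq_two.mp hds2
  have hnd : (PySem.Set.ofList stats).Nodup := PySem.Set.nodup_ofList stats
  have huv : u ≠ v := by rw [hds] at hnd; simp at hnd; exact hnd
  set lo := min u v with hlo'
  set hi := max u v with hhi'
  have hlh : lo < hi := min_lt_max.mpr huv
  have hperm2 : ([u, v] : List Int).Perm [lo, hi] := by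
    rcases le_total u v with h | h
    · simp [hlo', hhi', min_eq_left h, max_eq_right h]
    · simp [hlo', hhi', min_eq_right h, max_eq_left h]
      exact List.Perm.swap v u []
  have hlostats : lo ∈ stats := by
    have : lo ∈ ([u, v] : List Int) := by
      rcases min_choice u v with h | h <;> simp [hlo', h]
    rw [← hds] at this
    exact (PySem.Set.mem_ofList stats lo).mp this
  -- the minimum of stats is lo, so lo < -1
  have hlolt : lo < -1 := by
    cases hm : stats.min? with
    | none => rw [List.min?_eq_none_iff] at hm; simp [hm] at hlen6
    | some m =>
      have hmm := List.min?_eq_some_iff.mp hm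
      have hml : m ≤ lo := hmm.2 lo hlostats
      have hmem : m ∈ ([u, v] : List Int) := by
        rw [← hds]; exact (PySem.Set.mem_ofList stats m).mpr hmm.1
      have hlom : lo ≤ m := by
        simp only [List.mem_cons, List.not_mem_nil, or_false] at hmem
        rcases hmem with rfl | rfl
        · exact min_le_left _ _
        · exact min_le_right _ _
      rw [hm] at hmin; simp at hmin; omega
  have hnp2 : ¬ ((stats.length : Int) = 2) := by omega
  rw [if_neg hnp2]
  -- the sorted sentinel list: lo first, then -1 and hi in order
  rcases le_total hi (-1) with hhile | hhigt
  · -- L = [lo, hi, -1]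
    have hL : PySem.List.sorted (PySem.Set.ofList stats ++ [-1]) (fun x => x) = [lo, hi, -1] := by
      apply PySem.List.sorted_id_eq_of_perm_of_pairwise
      · rw [hds]
        exact hperm2.symm.append_right [-1]
      · simp [List.pairwise_cons]; omega
    rw [hL, PySem.List.slice_from_neg_ofNat _ 3 (by omega)]
    have hdrop : ([lo, hi, -1] : List Int).drop (([lo, hi, -1] : List Int).length - 3) = [lo, hi, -1] := by simp
    rw [hdrop]
    have g1 : PySem.List.pyGetD ([lo, hi, -1] : List Int) (-1) 0 = -1 := by
      rw [PySem.List.pyGetD_neg_ofNat _ 1 0 (by omega) (by simp)]; simp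
    have g2 : PySem.List.pyGetD ([lo, hi, -1] : List Int) (-2) 0 = hi := by
      rw [PySem.List.pyGetD_neg_ofNat _ 2 0 (by omega) (by simp)]; simp
    have g3 : PySem.List.pyGetD ([lo, hi, -1] : List Int) (-3) 0 = lo := by
      rw [PySem.List.pyGetD_neg_ofNat _ 3 0 (by omega) (by simp)]; simp
    intro heq
    obtain ⟨j, hj, hjv⟩ := List.mem_iff_getElem.mp hlostats
    have h' := congrArg (fun l => l[j]?) heq
    simp only [List.getElem?_map, List.getElem?_eq_getElem hj, Option.map_some, hjv,
      Option.some.injEq] at h'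
    rw [g1, g2, g3, hds] at h'
    rw [hperm2.countP_eq] at h'
    have hc : List.countP (fun d => decide (lo < d)) [lo, hi] = 1 := by
      simp [hlh]
    rw [hc] at h'
    rw [if_neg (by omega : ¬ (lo = -1)), if_neg (by simp; omega), if_neg (by omega),
      if_pos ⟨by exact_mod_cast hlen6, rfl⟩] at h'
    simp [pvPts, show 5 < (stats.length : Int) by exact_mod_cast hlen6] at h'
  · -- L = [lo, -1, hi]
    have hL : PySem.List.sorted (PySem.Set.ofList stats ++ [-1]) (fun x => x) = [lo, -1, hi] := by
      apply PySem.List.sorted_id_eq_of_perm_of_pairwise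
      · rw [hds]
        have h1 : ([lo, -1, hi] : List Int).Perm [lo, hi, -1] := by
          exact List.Perm.cons lo (List.Perm.swap hi (-1) [])
        exact h1.trans (hperm2.symm.append_right [-1])
      · simp [List.pairwise_cons]; omega
    rw [hL, PySem.List.slice_from_neg_ofNat _ 3 (by omega)]
    have hdrop : ([lo, -1, hi] : List Int).drop (([lo, -1, hi] : List Int).length - 3) = [lo, -1, hi] := by simp
    rw [hdrop]
    have g1 : PySem.List.pyGetD ([lo, -1, hi] : List Int) (-1) 0 = hi := by
      rw [PySem.List.pyGetD_neg_ofNat _ 1 0 (by omega) (by simp)]; simp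
    have g2 : PySem.List.pyGetD ([lo, -1, hi] : List Int) (-2) 0 = -1 := by
      rw [PySem.List.pyGetD_neg_ofNat _ 2 0 (by omega) (by simp)]; simp
    have g3 : PySem.List.pyGetD ([lo, -1, hi] : List Int) (-3) 0 = lo := by
      rw [PySem.List.pyGetD_neg_ofNat _ 3 0 (by omega) (by simp)]; simp
    intro heq
    obtain ⟨j, hj, hjv⟩ := List.mem_iff_getElem.mp hlostats
    have h' := congrArg (fun l => l[j]?) heq
    simp only [List.getElem?_map, List.getElem?_eq_getElem hj, Option.map_some, hjv,
      Option.some.injEq] at h'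
    rw [g1, g2, g3, hds] at h'
    rw [hperm2.countP_eq] at h'
    have hc : List.countP (fun d => decide (lo < d)) [lo, hi] = 1 := by
      simp [hlh]
    rw [hc] at h'
    rw [if_neg (by omega : ¬ (lo = hi)), if_neg (by simp; omega), if_neg (by omega),
      if_pos ⟨by exact_mod_cast hlen6, rfl⟩] at h'
    simp [pvPts, show 5 < (stats.length : Int) by exact_mod_cast hlen6] at h'

-- ===== VERDICT (by name: the statement is the Claim_ definition above) =====
theorem score_maki_spec : Claim_unchanged_score_maki := by
  intro stats _ hnD
  exact unchanged_main stats hnD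
theorem score_maki_changed : Claim_changed_score_maki := by unfold Claim_changed_score_maki; decide
theorem score_maki_tight : Claim_exact_score_maki := by
  intro stats _ hD
  exact tight_main stats hD
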